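-- pv_equiv track=rewrite | github.com/OpenMind7/OpenSpace | openspace/skill_engine/skill_utils.py | _is_near_capabilities
-- ===== SOURCE A (Python) =====
-- def _is_near_capabilities(key: str) -> bool:
--     """Return True if *key* looks like a typo of ``capabilities``.
--
--     W18.1: Detects frontmatter keys that are near-misses (edit distance <= 2
--     or ``capab`` prefix) to prevent fail-open bypass where a misspelled KEY
--     (e.g. ``capabilites:``) causes the manifest validator to treat the skill
--     as legacy (no capabilities = no restrictions).
--     """
--     target = "capabilities"
--     if key == target:
--         return False  # exact match — not a typo
--     key_lower = key.lower()
--     # W20 FP3: Exclude keys with extra suffix segments (_, -)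
--     # e.g., "capability_notes", "capability-map" are not typos
--     if "_" in key_lower or "-" in key_lower:
--         return False
--     # Prefix check: covers capabilites, capablities, capability, etc.
--     if key_lower.startswith("capab"):
--         return True
--     # Edit distance check for non-prefix typos (e.g. "cpabilities")
--     if abs(len(key_lower) - len(target)) > 2:
--         return False
--     # Levenshtein distance (O(mn), but strings are ~12 chars — trivial)
--     m, n = len(key_lower), len(target)
--     dp = list(range(n + 1))
--     for i in range(1, m + 1):
--         prev = dp[0]
--         dp[0] = i
--         for j in range(1, n + 1):
--             temp = dp[j]
--             if key_lower[i - 1] == target[j - 1]: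
--                 dp[j] = prev
--             else:
--                 dp[j] = 1 + min(prev, dp[j], dp[j - 1])
--             prev = temp
--     return dp[n] <= 2
-- ===== SOURCE B (Python) =====
-- def _is_near_capabilities(key: str) -> bool:
--     """Return True if *key* looks like a typo of ``capabilities``.
--
--     Same guards as the original; the full O(m*n) Levenshtein table is
--     replaced by a budget-bounded recursive check (edit distance <= 2).
--     """
--     target = "capabilities"
--     if key == target:
--         return False  # exact match -- not a typo
--     key_lower = key.lower()
--     if "_" in key_lower or "-" in key_lower:
--         return False
--     if key_lower.startswith("capab"):
--         return True
--     if abs(len(key_lower) - len(target)) > 2: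
--         return False
--
--     def within(i, j, k):
--         # True iff edit distance of key_lower[:i] and target[:j] is <= k
--         if k < 0:
--             return False
--         if i == 0:
--             return j <= k
--         if j == 0:
--             return i <= k
--         if key_lower[i - 1] == target[j - 1]:
--             return within(i - 1, j - 1, k)
--         return (within(i - 1, j - 1, k - 1)
--                 or within(i - 1, j, k - 1)
--                 or within(i, j - 1, k - 1))
--
--     return within(len(key_lower), len(target), 2)
-- ===== Notes on version B (the rewrite author's own statement) =====
-- stated objective: alternative
-- what changed: The rolling-array Levenshtein DP table is replaced by a budget-bounded recursive check within(i,j,k) that decides the near-miss threshold directly, pruning whole subproblems once the budget is spent; all guards are unchanged.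
import Mathlib
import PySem

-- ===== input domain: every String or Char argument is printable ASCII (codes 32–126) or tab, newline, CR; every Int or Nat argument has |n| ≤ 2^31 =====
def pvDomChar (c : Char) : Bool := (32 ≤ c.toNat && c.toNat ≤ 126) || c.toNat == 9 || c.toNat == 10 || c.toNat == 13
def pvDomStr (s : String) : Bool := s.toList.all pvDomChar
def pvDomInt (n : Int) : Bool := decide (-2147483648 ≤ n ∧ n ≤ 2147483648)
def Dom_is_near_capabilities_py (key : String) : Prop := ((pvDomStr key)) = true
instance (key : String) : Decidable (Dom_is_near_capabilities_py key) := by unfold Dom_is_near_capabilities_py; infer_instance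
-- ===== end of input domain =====

-- B replaces the rolling-array Levenshtein DP by a budget-bounded recursive check of 'edit distance ≤ 2'; guards unchanged (objective: alternative).

-- ===== PORT A =====
-- literal port of A's rolling-array DP; indices i, j come from range(1, …) so they are ≥ 1
-- and the .toNat / .getD accesses are exact (always in range, as in the Python).
def is_near_capabilities_py (key : String) : Bool :=
  let target : String := "capabilities"
  if key == target then false
  else
    let key_lower := PySem.Str.lower key
    if PySem.Str.isIn "_" key_lower || PySem.Str.isIn "-" key_lower then false
    else if PySem.Str.startswith key_lower "capab" then true
    else if (PySem.Str.len key_lower - PySem.Str.len target).natAbs > 2 then false  -- abs(len - len) > 2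
    else
      let kl := key_lower.toList
      let tl := target.toList
      let m := kl.length
      let n := tl.length
      let dp0 : List Int := PySem.List.pyRange 0 ((n : Int) + 1) 1   -- dp = list(range(n + 1))
      let dpFinal := (PySem.List.pyRange 1 ((m : Int) + 1) 1).foldl (fun dp i =>
        let prev := dp.getD 0 0                      -- prev = dp[0]
        let dp := dp.set 0 i                         -- dp[0] = i
        let st := (PySem.List.pyRange 1 ((n : Int) + 1) 1).foldl (fun (st : List Int × Int) j =>
          let dp := st.1
          let prev := st.2
          let temp := dp.getD j.toNat 0              -- temp = dp[j]
          let dp :=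
            if kl.getD (i.toNat - 1) ' ' == tl.getD (j.toNat - 1) ' ' then
              dp.set j.toNat prev                    -- dp[j] = prev
            else
              dp.set j.toNat (1 + min prev (min (dp.getD j.toNat 0) (dp.getD (j.toNat - 1) 0)))
          (dp, temp)) (dp, prev)                     -- prev = temp
        st.1) dp0
      decide (dpFinal.getD n 0 ≤ 2)                  -- return dp[n] <= 2

-- ===== PORT B =====
-- within i j k : edit distance of kl[:i] and tl[:j] is ≤ k (k an Int budget, as in Source B)
def pvWithin (kl tl : List Char) (i j : Nat) (k : Int) : Bool :=
  if k < 0 then false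
  else if i = 0 then decide ((j : Int) ≤ k)
  else if j = 0 then decide ((i : Int) ≤ k)
  else if kl.getD (i - 1) ' ' == tl.getD (j - 1) ' ' then
    pvWithin kl tl (i - 1) (j - 1) k
  else
    pvWithin kl tl (i - 1) (j - 1) (k - 1) || pvWithin kl tl (i - 1) j (k - 1)
      || pvWithin kl tl i (j - 1) (k - 1)
termination_by (i, j)
decreasing_by all_goals (simp_all; omega)

def is_near_capabilities_py_alt (key : String) : Bool :=
  let target : String := "capabilities"
  if key == target then false
  else
    let key_lower := PySem.Str.lower key
    if PySem.Str.isIn "_" key_lower || PySem.Str.isIn "-" key_lower then false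
    else if PySem.Str.startswith key_lower "capab" then true
    else if (PySem.Str.len key_lower - PySem.Str.len target).natAbs > 2 then false
    else
      let kl := key_lower.toList
      let tl := target.toList
      pvWithin kl tl kl.length tl.length 2

-- ===== PRECONDITION & SPEC =====
def Spec_is_near_capabilities_py (key : String) (out : Bool) : Prop := out = is_near_capabilities_py_alt key
instance (key : String) (out : Bool) : Decidable (Spec_is_near_capabilities_py key out) := by unfold Spec_is_near_capabilities_py; infer_instance

-- ===== CLAIM (what is proved, stated in full; the proofs are below) =====
def Claim_equal_is_near_capabilities_py : Prop := ∀ (key : String), Dom_is_near_capabilities_py key → Spec_is_near_capabilities_py key (is_near_capabilities_py key)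

-- ===== LEMMAS AND PROOFS =====

-- reference edit distance of kl[:i] and tl[:j] (standard Levenshtein recurrence)
def pvEd (kl tl : List Char) : Nat → Nat → Nat
  | 0, j => j
  | i + 1, 0 => i + 1
  | i + 1, j + 1 =>
    if kl.getD i ' ' == tl.getD j ' ' then pvEd kl tl i j
    else 1 + min (pvEd kl tl i j) (min (pvEd kl tl i (j + 1)) (pvEd kl tl (i + 1) j))
termination_by i j => (i, j)

theorem pvEd_left_zero (kl tl : List Char) (i : Nat) : pvEd kl tl i 0 = i := by
  cases i
  · rw [pvEd]
  · rw [pvEd]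

-- B's recursion decides pvEd ≤ k
theorem pvWithin_eq (kl tl : List Char) (i j : Nat) (k : Int) :
    pvWithin kl tl i j k = decide ((pvEd kl tl i j : Int) ≤ k) := by
  fun_induction pvWithin kl tl i j k
  case case1 i j k hk =>
    have h0 : (0 : Int) ≤ (pvEd kl tl i j : Int) := Int.natCast_nonneg _
    symm
    simp only [decide_eq_false_iff_not]
    omega
  case case2 j k hk => rw [pvEd]
  case case3 i k h1 h2 => rw [pvEd_left_zero]
  case case4 i j k h1 h2 h3 hc ih =>
    obtain ⟨i', rfl⟩ := Nat.exists_eq_succ_of_ne_zero h2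
    obtain ⟨j', rfl⟩ := Nat.exists_eq_succ_of_ne_zero h3
    simp only [Nat.succ_sub_one, Nat.succ_eq_add_one] at hc ih ⊢
    rw [ih]
    have he : pvEd kl tl (i' + 1) (j' + 1) = pvEd kl tl i' j' := by
      rw [pvEd, if_pos hc]
    rw [he]
    rfl
  case case5 i j k h1 h2 h3 hc ih3 ih2 ih1 =>
    obtain ⟨i', rfl⟩ := Nat.exists_eq_succ_of_ne_zero h2
    obtain ⟨j', rfl⟩ := Nat.exists_eq_succ_of_ne_zero h3
    simp only [Nat.succ_sub_one, Nat.succ_eq_add_one] at hc ih1 ih2 ih3 ⊢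
    rw [ih1, ih2, ih3]
    have he : (pvEd kl tl (i' + 1) (j' + 1) : Int)
        = 1 + min (pvEd kl tl i' j' : Int)
            (min (pvEd kl tl i' (j' + 1) : Int) (pvEd kl tl (i' + 1) j' : Int)) := by
      rw [pvEd, if_neg hc]
      push_cast
      ring
    rw [he]
    rw [Bool.eq_iff_iff]
    simp only [Bool.or_eq_true, decide_eq_true_eq]
    omega

-- row I of the DP table, as the Int list A's loop maintains
def pvRow (kl tl : List Char) (I : Nat) : List Int :=
  (List.range (tl.length + 1)).map (fun j => (pvEd kl tl I j : Int))

-- partially updated row: entries ≤ J are from row I+1, the rest still from row I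
def pvMix (kl tl : List Char) (I J : Nat) : List Int :=
  (List.range (tl.length + 1)).map
    (fun j => if j ≤ J then (pvEd kl tl (I + 1) j : Int) else (pvEd kl tl I j : Int))

theorem pvMix_getD (kl tl : List Char) (I J p : Nat) (hp : p ≤ tl.length) :
    (pvMix kl tl I J).getD p 0
      = if p ≤ J then (pvEd kl tl (I + 1) p : Int) else (pvEd kl tl I p : Int) := by
  rw [pvMix, List.getD_eq_getElem?_getD, List.getElem?_map, List.getElem?_range (by omega)]
  rfl

theorem pvMix_getD_gt (kl tl : List Char) (I J p : Nat) (hp : p ≤ tl.length) (h : J < p) :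
    (pvMix kl tl I J).getD p 0 = (pvEd kl tl I p : Int) := by
  rw [pvMix_getD kl tl I J p hp]
  rw [if_neg (show ¬ p ≤ J by omega)]

theorem pvMix_getD_le (kl tl : List Char) (I J p : Nat) (hp : p ≤ tl.length) (h : p ≤ J) :
    (pvMix kl tl I J).getD p 0 = (pvEd kl tl (I + 1) p : Int) := by
  rw [pvMix_getD kl tl I J p hp]
  rw [if_pos h]

theorem pvRow_getD (kl tl : List Char) (I p : Nat) (hp : p ≤ tl.length) :
    (pvRow kl tl I).getD p 0 = (pvEd kl tl I p : Int) := by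
  rw [pvRow, List.getD_eq_getElem?_getD, List.getElem?_map, List.getElem?_range (by omega)]
  rfl

-- the inner j-loop, in the exact shape of A's port
def pvInnerStep (kl tl : List Char) (i : Int) (st : List Int × Int) (j : Int) : List Int × Int :=
  let dp := st.1
  let prev := st.2
  let temp := dp.getD j.toNat 0
  let dp :=
    if kl.getD (i.toNat - 1) ' ' == tl.getD (j.toNat - 1) ' ' then
      dp.set j.toNat prev
    else
      dp.set j.toNat (1 + min prev (min (dp.getD j.toNat 0) (dp.getD (j.toNat - 1) 0)))
  (dp, temp)

theorem pvMix_set (kl tl : List Char) (I J : Nat) :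
    (pvMix kl tl I J).set (J + 1) (pvEd kl tl (I + 1) (J + 1) : Int) = pvMix kl tl I (J + 1) := by
  apply List.ext_getElem
  · simp [pvMix]
  · intro p h1 h2
    simp only [List.getElem_set, pvMix, List.getElem_map, List.getElem_range]
    rcases Nat.lt_trichotomy p (J + 1) with h | h | h
    · rw [if_neg (show ¬ J + 1 = p by omega), if_pos (show p ≤ J by omega),
        if_pos (show p ≤ J + 1 by omega)]
    · subst h
      rw [if_pos rfl, if_pos (show J + 1 ≤ J + 1 by omega)]
    · rw [if_neg (show ¬ J + 1 = p by omega), if_neg (show ¬ p ≤ J by omega),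
        if_neg (show ¬ p ≤ J + 1 by omega)]

theorem pvInner_inv (kl tl : List Char) (I : Nat) (J : Nat) (hJ : J ≤ tl.length) :
    (PySem.List.pyRange 1 ((J : Int) + 1) 1).foldl (pvInnerStep kl tl ((I : Int) + 1))
        (pvMix kl tl I 0, (pvEd kl tl I 0 : Int))
      = (pvMix kl tl I J, (pvEd kl tl I J : Int)) := by
  induction J with
  | zero => rw [PySem.List.pyRange_one_eq_nil (by omega)]; rfl
  | succ J ih =>
    have h1 : (((J + 1 : Nat) : Int) + 1) = ((J : Int) + 1) + 1 := by push_cast; ring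
    rw [h1, PySem.List.pyRange_one_succ_right (a := 1) (b := (J : Int) + 1) (by omega),
      List.foldl_append, ih (by omega)]
    simp only [List.foldl_cons, List.foldl_nil, pvInnerStep]
    have hjt : ((J : Int) + 1).toNat = J + 1 := by omega
    have hit : ((I : Int) + 1).toNat = I + 1 := by omega
    rw [hjt, hit]
    simp only [Nat.add_sub_cancel]
    rw [pvMix_getD_gt kl tl I J (J + 1) (by omega) (by omega),
      pvMix_getD_le kl tl I J J (by omega) (by omega)]
    by_cases hc : kl.getD I ' ' == tl.getD J ' '
    · rw [if_pos hc]
      have he : pvEd kl tl (I + 1) (J + 1) = pvEd kl tl I J := by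
        rw [pvEd, if_pos hc]
      rw [← he, pvMix_set kl tl I J]
    · rw [if_neg hc]
      have he : (1 + min (pvEd kl tl I J : Int)
            (min (pvEd kl tl I (J + 1) : Int) (pvEd kl tl (I + 1) J : Int)))
          = (pvEd kl tl (I + 1) (J + 1) : Int) := by
        rw [pvEd, if_neg hc]
        push_cast
        ring
      rw [he, pvMix_set kl tl I J]

theorem pvRow_set (kl tl : List Char) (M : Nat) :
    (pvRow kl tl M).set 0 ((M : Int) + 1) = pvMix kl tl M 0 := by
  apply List.ext_getElem
  · simp [pvRow, pvMix]
  · intro p h1 h2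
    simp only [List.getElem_set, pvRow, pvMix, List.getElem_map, List.getElem_range]
    rcases Nat.eq_zero_or_pos p with h | h
    · subst h
      rw [if_pos rfl, if_pos (show 0 ≤ 0 by omega), pvEd_left_zero]
      push_cast
      ring
    · rw [if_neg (show ¬ 0 = p by omega), if_neg (show ¬ p ≤ 0 by omega)]

theorem pvMix_full (kl tl : List Char) (I : Nat) :
    pvMix kl tl I tl.length = pvRow kl tl (I + 1) := by
  apply List.ext_getElem
  · simp [pvMix, pvRow]
  · intro p h1 h2
    have hp : p < tl.length + 1 := by simpa [pvMix] using h1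
    simp only [pvMix, pvRow, List.getElem_map, List.getElem_range]
    rw [if_pos (show p ≤ tl.length by omega)]

theorem pvOuter_inv (kl tl : List Char) (M : Nat) :
    (PySem.List.pyRange 1 ((M : Int) + 1) 1).foldl
        (fun dp i =>
          let prev := dp.getD 0 0
          let dp := dp.set 0 i
          ((PySem.List.pyRange 1 ((tl.length : Int) + 1) 1).foldl (pvInnerStep kl tl i) (dp, prev)).1)
        (pvRow kl tl 0)
      = pvRow kl tl M := by
  induction M with
  | zero =>
    rw [show (((0 : Nat) : Int) + 1) = 1 by norm_num,
      PySem.List.pyRange_one_eq_nil (a := 1) (b := 1) (by omega)]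
    rfl
  | succ M ih =>
    have h1 : (((M + 1 : Nat) : Int) + 1) = ((M : Int) + 1) + 1 := by push_cast; ring
    rw [h1, PySem.List.pyRange_one_succ_right (a := 1) (b := (M : Int) + 1) (by omega),
      List.foldl_append, ih]
    simp only [List.foldl_cons, List.foldl_nil]
    rw [pvRow_getD kl tl M 0 (Nat.zero_le _), pvRow_set kl tl M,
      pvInner_inv kl tl M tl.length (le_refl _)]
    exact pvMix_full kl tl M

-- A's DP block equals B's recursive check
theorem pvDP_eq_within (kl tl : List Char) :
    decide ((((PySem.List.pyRange 1 ((kl.length : Int) + 1) 1).foldl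
        (fun dp i =>
          let prev := dp.getD 0 0
          let dp := dp.set 0 i
          ((PySem.List.pyRange 1 ((tl.length : Int) + 1) 1).foldl (pvInnerStep kl tl i) (dp, prev)).1)
        (PySem.List.pyRange 0 ((tl.length : Int) + 1) 1)).getD tl.length 0) ≤ 2)
      = pvWithin kl tl kl.length tl.length 2 := by
  have hinit : PySem.List.pyRange 0 ((tl.length : Int) + 1) 1 = pvRow kl tl 0 := by
    have h2 : ((tl.length : Int) + 1) = ((tl.length + 1 : Nat) : Int) := by push_cast; ring
    rw [h2, PySem.List.pyRange_zero_nat]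
    simp [pvRow, pvEd]
  rw [hinit, pvOuter_inv kl tl kl.length, pvRow_getD kl tl kl.length tl.length (le_refl _),
    pvWithin_eq]

-- ===== VERDICT (by name: the statement is the Claim_ definition above) =====
theorem is_near_capabilities_py_spec : Claim_equal_is_near_capabilities_py := by
  intro key _
  unfold Spec_is_near_capabilities_py is_near_capabilities_py is_near_capabilities_py_alt
  simp only
  split_ifs
  · rfl
  · rfl
  · rfl
  · rfl
  · exact pvDP_eq_within _ _
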